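-- pv_equiv track=rewrite | github.com/JINAILAB/coding_test | 백준/Silver/15663. N과 M （9）/N과 M （9）.py | find_sequences
-- ===== SOURCE A (Python) =====
-- from itertools import combinations, permutations
--
-- def find_sequences(M, numbers):
--     numbers.sort()
--
--     combs = combinations(numbers, M)
--
--     result = []
--     for comb in combs:
--         result.extend(permutations(comb, M))
--
--     result = sorted(set(result))
--     return result
-- ===== SOURCE B (Python) =====
-- def find_sequences(M, numbers):
--     # Backtracking over a sorted pool, branching only on the first occurrence
--     # of each distinct value per depth: emits the distinct M-sequences directly
--     # in lexicographic order, no global dedup/sort pass needed.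
--     # (Unlike A, does not sort `numbers` in place.)
--     def dfs(rem, pool):
--         if rem > len(pool):
--             return []
--         if rem == 0:
--             return [()]
--         res = []
--         for i, v in enumerate(pool):
--             if i == 0 or pool[i - 1] != v:
--                 for t in dfs(rem - 1, pool[:i] + pool[i + 1:]):
--                     res.append((v,) + t)
--         return res
--     return dfs(M, sorted(numbers))
-- ===== Notes on version B (the rewrite author's own statement) =====
-- stated objective: faster
-- what changed: A materialises every permutation of every combination, deduplicates with set() and sorts the whole output; B does a duplicate-skipping backtracking search over the sorted pool that emits each distinct sequence exactly once, already in lexicographic order, so the dedup and final sort disappear.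
import Mathlib
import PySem

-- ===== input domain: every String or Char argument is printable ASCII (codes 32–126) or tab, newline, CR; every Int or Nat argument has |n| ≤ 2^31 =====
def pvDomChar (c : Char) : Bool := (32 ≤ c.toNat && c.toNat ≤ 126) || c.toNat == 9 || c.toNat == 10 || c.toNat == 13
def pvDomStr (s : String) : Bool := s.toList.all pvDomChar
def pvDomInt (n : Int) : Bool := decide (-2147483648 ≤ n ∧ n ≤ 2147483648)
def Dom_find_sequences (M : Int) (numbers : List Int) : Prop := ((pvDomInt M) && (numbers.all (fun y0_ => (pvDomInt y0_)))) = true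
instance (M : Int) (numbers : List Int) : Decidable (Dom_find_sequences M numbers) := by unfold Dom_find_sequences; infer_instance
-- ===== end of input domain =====

-- B replaces A's generate-all-permutations-then-dedup-then-sort pipeline by a duplicate-skipping
-- backtracking search over the sorted pool that emits the distinct sequences directly in
-- lexicographic order, so no duplicate sequence is ever generated. A sorts `numbers` in place; the
-- equivalence proved here is about the RETURN value only (B does not mutate its argument).

-- ===== PORT A =====
def find_sequences (M : Int) (numbers : List Int) : List (List Int) :=
  let ns := PySem.List.sorted numbers (fun x => x) false            -- numbers.sort()
  let combs := PySem.List.combinations ns M.toNat                   -- combinations(numbers, M); M < 0 raises ValueError → Pre_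
  let result := combs.foldl (fun acc comb => acc ++ PySem.List.permutations comb M.toNat) []
  PySem.List.sorted (PySem.Set.ofList result) (fun x => x) false    -- sorted(set(result))

-- ===== PORT B =====
-- helper: dfs(rem, pool) of Source B
def pvDfs (rem : Int) (pool : List Int) : List (List Int) :=
  if (pool.length : Int) < rem then []
  else if rem == 0 then [[]]
  else
    (PySem.List.enumerate pool).attach.foldl
      (fun res iv =>
        if iv.1.1 == 0 || PySem.List.pyGet? pool (iv.1.1 - 1) != some iv.1.2 then
          res ++ (pvDfs (rem - 1)
              (PySem.List.slice pool none (some iv.1.1) ++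
               PySem.List.slice pool (some (iv.1.1 + 1)) none)).map (fun t => iv.1.2 :: t)
        else res) []
termination_by pool.length
decreasing_by
  obtain ⟨k, hk, hiv⟩ := (PySem.List.mem_enumerate_iff pool 0 iv.1).mp iv.2
  have e1 : iv.1.1 = (k : Int) := by rw [hiv]; simp
  have e2 : ((k : Int) + 1) = ((k + 1 : Nat) : Int) := by push_cast; ring
  rw [e1, e2, PySem.List.slice_to_natCast, PySem.List.slice_from_natCast]
  simp only [List.length_append, List.length_take, List.length_drop]
  omega

def find_sequences_alt (M : Int) (numbers : List Int) : List (List Int) :=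
  pvDfs M (PySem.List.sorted numbers (fun x => x) false)            -- dfs(M, sorted(numbers))

-- ===== PRECONDITION & SPEC =====
-- Pre_ excludes only M < 0, on which A's combinations(numbers, M) raises ValueError.
def Pre_find_sequences (M : Int) (numbers : List Int) : Prop := 0 ≤ M
instance (M : Int) (numbers : List Int) : Decidable (Pre_find_sequences M numbers) := by unfold Pre_find_sequences; infer_instance
def pvWitness_find_sequences : Int × List Int := (2, [1, 1, 2])

def Spec_find_sequences (M : Int) (numbers : List Int) (out : List (List Int)) : Prop := out = find_sequences_alt M numbers
instance (M : Int) (numbers : List Int) (out : List (List Int)) : Decidable (Spec_find_sequences M numbers out) := by unfold Spec_find_sequences; infer_instance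

-- ===== CLAIM (what is proved, stated in full; the proofs are below) =====
def Claim_equal_find_sequences : Prop := ∀ (M : Int) (numbers : List Int), Dom_find_sequences M numbers → Pre_find_sequences M numbers → Spec_find_sequences M numbers (find_sequences M numbers)

-- ===== LEMMAS AND PROOFS =====

theorem pvDfs_eq (rem : Int) (pool : List Int) :
    pvDfs rem pool = if (pool.length : Int) < rem then []
      else if rem == 0 then [[]]
      else (PySem.List.enumerate pool).flatMap (fun iv =>
        if iv.1 == 0 || PySem.List.pyGet? pool (iv.1 - 1) != some iv.2 then
          (pvDfs (rem - 1) (PySem.List.slice pool none (some iv.1) ++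
              PySem.List.slice pool (some (iv.1 + 1)) none)).map (fun t => iv.2 :: t)
        else []) := by
  rw [pvDfs]
  split
  · rfl
  split
  · rfl
  · rw [List.foldl_attach (f := fun (res : List (List Int)) (iv : Int × Int) =>
        if iv.1 == 0 || PySem.List.pyGet? pool (iv.1 - 1) != some iv.2 then
          res ++ (pvDfs (rem - 1)
              (PySem.List.slice pool none (some iv.1) ++
               PySem.List.slice pool (some (iv.1 + 1)) none)).map (fun t => iv.2 :: t)
        else res)]
    rw [PySem.List.foldl_congr_mem _ _
      (fun (res : List (List Int)) (iv : Int × Int) =>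
        res ++ (if iv.1 == 0 || PySem.List.pyGet? pool (iv.1 - 1) != some iv.2 then
          (pvDfs (rem - 1)
              (PySem.List.slice pool none (some iv.1) ++
               PySem.List.slice pool (some (iv.1 + 1)) none)).map (fun t => iv.2 :: t)
        else [])) _ ?_]
    · rw [PySem.List.foldl_append_eq_flatMap]
      simp
    · intro acc x _
      by_cases h : (x.1 == 0 || PySem.List.pyGet? pool (x.1 - 1) != some x.2) = true
      · simp only [if_pos h]
      · simp only [if_neg h, List.append_nil]

theorem pv_slice_eraseIdx (pool : List Int) (k : Nat) :
    PySem.List.slice pool none (some (k : Int)) ++ PySem.List.slice pool (some ((k : Int) + 1)) none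
      = pool.eraseIdx k := by
  have e2 : ((k : Int) + 1) = ((k + 1 : Nat) : Int) := by push_cast; ring
  rw [e2, PySem.List.slice_to_natCast, PySem.List.slice_from_natCast,
    List.eraseIdx_eq_take_drop_succ]

theorem pv_idxOf_le {l : List Int} {v : Int} : ∀ {j : Nat}, (hj : j < l.length) → l[j] = v → l.idxOf v ≤ j := by
  induction l with
  | nil => intro j hj; simp at hj
  | cons x t ih =>
    intro j hj hv
    by_cases hx : x = v
    · simp [hx]
    · cases j with
      | zero => simp at hv; exact absurd hv hx
      | succ j' =>
        have hb : (x == v) = false := by simp [hx]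
        simp only [List.idxOf_cons, hb, cond_false]
        have := ih (by simpa using Nat.lt_of_succ_lt_succ hj) (by simpa using hv)
        omega

theorem mem_pvDfs : ∀ (n : Nat) (pool : List Int), pool.length = n → ∀ (rem : Int) (s : List Int), 0 ≤ rem →
    (s ∈ pvDfs rem pool ↔ s.Subperm pool ∧ s.length = rem.toNat) := by
  intro n
  induction n using Nat.strong_induction_on with
  | _ n IH =>
    intro pool hlen rem s hrem
    rw [pvDfs_eq]
    by_cases hbig : (pool.length : Int) < rem
    · rw [if_pos hbig]
      simp only [List.not_mem_nil, false_iff, not_and]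
      intro hsub hlens
      have := hsub.length_le
      omega
    rw [if_neg hbig]
    by_cases h0 : rem = 0
    · subst h0
      simp only [BEq.rfl, if_pos, List.mem_singleton]
      constructor
      · rintro rfl; exact ⟨List.nil_subperm, rfl⟩
      · rintro ⟨-, hl⟩
        have hz : s.length = 0 := by simpa using hl
        simpa using List.length_eq_zero_iff.mp hz
    · have hb : (rem == 0) = false := by simp [h0]
      rw [hb]
      simp only [Bool.false_eq_true, if_false, List.mem_flatMap]
      constructor
      · rintro ⟨iv, hiv, hs⟩
        obtain ⟨k, hk, rfl⟩ := (PySem.List.mem_enumerate_iff pool 0 iv).mp hiv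
        simp only [zero_add] at hs
        by_cases hc : (((k:Int)) == 0 || PySem.List.pyGet? pool (((k:Int)) - 1) != some pool[k]) = true
        swap
        · rw [if_neg hc] at hs; simp at hs
        rw [if_pos hc, pv_slice_eraseIdx] at hs
        obtain ⟨t, ht, rfl⟩ := List.mem_map.mp hs
        have hlen' : (pool.eraseIdx k).length = n - 1 := by
          rw [List.length_eraseIdx, if_pos hk, hlen]
        have hrec := (IH (n-1) (by omega) _ hlen' (rem-1) t (by omega)).mp ht
        obtain ⟨hsub, hlt⟩ := hrec
        constructor
        · have h1 : (pool[k] :: t).Subperm (pool[k] :: pool.eraseIdx k) :=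
            (List.subperm_cons _).mpr hsub
          have h2 : (pool[k] :: pool.eraseIdx k).Perm pool :=
            PySem.List.perm_cons_eraseIdx pool (List.getElem?_eq_getElem hk)
          exact (h2.subperm_left).mp h1
        · simp only [List.length_cons, hlt]; omega
      · rintro ⟨hsub, hlens⟩
        cases s with
        | nil => simp at hlens; omega
        | cons v t =>
          have hv : v ∈ pool := hsub.subset List.mem_cons_self
          have hk : pool.idxOf v < pool.length := List.idxOf_lt_length_of_mem hv
          have hgk : pool[pool.idxOf v] = v := List.getElem_idxOf hk
          refine ⟨(0 + ((pool.idxOf v : Nat) : Int), pool[pool.idxOf v]),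
            (PySem.List.mem_enumerate_iff pool 0 _).mpr ⟨pool.idxOf v, hk, rfl⟩, ?_⟩
          simp only [zero_add]
          have hcond : (((pool.idxOf v : Nat) : Int) == 0 ||
              PySem.List.pyGet? pool (((pool.idxOf v : Nat) : Int) - 1) != some pool[pool.idxOf v]) = true := by
            by_cases hk0 : pool.idxOf v = 0
            · simp [hk0]
            · rw [Bool.or_eq_true]; right
              have e1 : (((pool.idxOf v : Nat) : Int) - 1) = ((pool.idxOf v - 1 : Nat) : Int) := by
                omega
              rw [e1, PySem.List.pyGet?_natCast]
              have hk1 : pool.idxOf v - 1 < pool.length := by omega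
              rw [List.getElem?_eq_getElem hk1]
              simp only [bne_iff_ne, ne_eq, Option.some.injEq]
              intro heq
              have := pv_idxOf_le hk1 (heq.trans hgk)
              omega
          rw [if_pos hcond, pv_slice_eraseIdx, List.mem_map]
          refine ⟨t, ?_, by rw [hgk]⟩
          have herase : pool.eraseIdx (pool.idxOf v) = pool.erase v :=
            (List.erase_eq_eraseIdx_of_idxOf rfl).symm
          have hperm : pool.Perm (v :: pool.erase v) := List.perm_cons_erase hv
          have hsub' : t.Subperm (pool.erase v) := (List.subperm_cons v).mp ((hperm.subperm_left).mp hsub)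
          have hlen' : (pool.eraseIdx (pool.idxOf v)).length = n - 1 := by
            rw [List.length_eraseIdx, if_pos hk, hlen]
          apply (IH (n-1) (by omega) _ hlen' (rem-1) t (by omega)).mpr
          refine ⟨herase ▸ hsub', ?_⟩
          simp only [List.length_cons] at hlens
          omega

theorem pvDfs_sorted : ∀ (n : Nat) (pool : List Int), pool.length = n → pool.Pairwise (· ≤ ·) →
    ∀ (rem : Int), (pvDfs rem pool).Pairwise (· < ·) := by
  intro n
  induction n using Nat.strong_induction_on with
  | _ n IH =>
    intro pool hlen hp rem
    rw [pvDfs_eq]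
    split
    · simp
    split
    · simp
    · rw [List.pairwise_flatMap]
      have hpg : ∀ (i j : Nat) (_ : i < pool.length) (_ : j < pool.length), i < j → pool[i] ≤ pool[j] := by
        intro i j hi hj hij
        exact List.pairwise_iff_getElem.mp hp i j hi hj hij
      constructor
      · intro iv hiv
        obtain ⟨k, hk, rfl⟩ := (PySem.List.mem_enumerate_iff pool 0 iv).mp hiv
        simp only [zero_add]
        split
        · rw [pv_slice_eraseIdx, List.pairwise_map]
          have hlen' : (pool.eraseIdx k).length = n - 1 := by
            rw [List.length_eraseIdx, if_pos hk, hlen]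
          have hrec := IH (n-1) (by omega) (pool.eraseIdx k) hlen'
            (hp.sublist (List.eraseIdx_sublist pool k)) (rem-1)
          exact hrec.imp (fun h => List.cons_lt_cons_iff.mpr (Or.inr ⟨rfl, h⟩))
        · simp
      · rw [PySem.List.enumerate_eq_zipIdx_map, List.pairwise_map, List.pairwise_iff_getElem]
        intro a b ha hb hab
        rw [List.length_zipIdx] at ha hb
        intro x hx y hy
        simp only [List.getElem_zipIdx, zero_add] at hx hy
        by_cases hca : (((a:Int)) == 0 || PySem.List.pyGet? pool (((a:Int)) - 1) != some pool[a]) = true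
        swap
        · rw [if_neg hca] at hx; simp at hx
        by_cases hcb : (((b:Int)) == 0 || PySem.List.pyGet? pool (((b:Int)) - 1) != some pool[b]) = true
        swap
        · rw [if_neg hcb] at hy; simp at hy
        rw [if_pos hca] at hx
        rw [if_pos hcb] at hy
        obtain ⟨t, -, rfl⟩ := List.mem_map.mp hx
        obtain ⟨u, -, rfl⟩ := List.mem_map.mp hy
        apply List.cons_lt_cons_iff.mpr
        left
        -- pool[a] < pool[b]
        have hb1 : (b:Int) ≠ 0 := by omega
        have hne : pool[b-1]'(by omega) ≠ pool[b] := by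
          rcases Bool.or_eq_true_iff.mp hcb with h | h
          · exact absurd (by exact_mod_cast beq_iff_eq.mp h) hb1
          · have e1 : (((b:Nat)) : Int) - 1 = ((b - 1 : Nat) : Int) := by omega
            rw [e1, PySem.List.pyGet?_natCast, List.getElem?_eq_getElem (by omega : b - 1 < pool.length)] at h
            simpa using h
        have h1 : pool[a] ≤ pool[b-1]'(by omega) := by
          rcases Nat.lt_or_ge a (b-1) with h | h
          · exact hpg a (b-1) ha (by omega) h
          · have : a = b - 1 := by omega
            subst this; rfl
        have h2 : pool[b-1]'(by omega) ≤ pool[b] := hpg (b-1) b (by omega) hb (by omega)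
        omega

theorem pv_mem_permutations : ∀ (n : Nat) (xs : List Int), xs.length = n → ∀ (p : List Int),
    (p ∈ PySem.List.permutations xs xs.length ↔ p.Perm xs) := by
  intro n
  induction n using Nat.strong_induction_on with
  | _ n IH =>
    intro xs hlen p
    constructor
    · exact PySem.List.perm_of_mem_permutations
    · intro hperm
      cases n with
      | zero =>
        have : xs = [] := List.length_eq_zero_iff.mp hlen
        subst this
        have : p = [] := List.perm_nil.mp hperm
        subst this
        simp [PySem.List.permutations_zero]
      | succ m =>
        rw [hlen, PySem.List.permutations_succ, List.mem_flatMap]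
        cases p with
        | nil =>
          have := hperm.length_eq; simp [hlen] at this
        | cons v t =>
          have hv : v ∈ xs := hperm.subset List.mem_cons_self
          obtain ⟨k, hk, hgk⟩ := List.mem_iff_getElem.mp hv
          refine ⟨k, List.mem_range.mpr hk, ?_⟩
          have hget : xs[k]? = some v := by rw [List.getElem?_eq_getElem hk, hgk]
          rw [hget]
          simp only [List.mem_map]
          refine ⟨t, ?_, rfl⟩
          have hperm' : t.Perm (xs.eraseIdx k) := by
            have h2 : (v :: xs.eraseIdx k).Perm xs := PySem.List.perm_cons_eraseIdx xs hget
            exact (hperm.trans h2.symm).cons_inv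
          have hlen' : (xs.eraseIdx k).length = m := by
            rw [List.length_eraseIdx, if_pos hk, hlen]
            omega
          have := (IH m (by omega) (xs.eraseIdx k) hlen' t).mpr hperm'
          rwa [hlen'] at this

theorem mem_findA (M : Int) (numbers : List Int) (s : List Int) :
    s ∈ find_sequences M numbers ↔ s.Subperm numbers ∧ s.length = M.toNat := by
  simp only [find_sequences]
  rw [PySem.List.mem_sorted, PySem.Set.mem_ofList, PySem.List.foldl_append_eq_flatMap]
  simp only [List.nil_append, List.mem_flatMap]
  constructor
  · rintro ⟨c, hc, hs⟩
    obtain ⟨hsub, hlenc⟩ := (PySem.List.mem_combinations_iff _ _ _).mp hc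
    have hperm : s.Perm c := (pv_mem_permutations c.length c rfl s).mp (by rwa [hlenc])
    constructor
    · have h1 : s.Subperm (PySem.List.sorted numbers (fun x => x) false) := ⟨c, hperm.symm, hsub⟩
      exact ((PySem.List.sorted_perm numbers (fun x => x) false).subperm_left).mp h1
    · rw [hperm.length_eq, hlenc]
  · rintro ⟨hsub, hlens⟩
    have h1 : s.Subperm (PySem.List.sorted numbers (fun x => x) false) :=
      ((PySem.List.sorted_perm numbers (fun x => x) false).subperm_left).mpr hsub
    obtain ⟨c, hcs, hcsub⟩ := h1
    have hlenc : c.length = M.toNat := by rw [hcs.length_eq, hlens]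
    refine ⟨c, (PySem.List.mem_combinations_iff _ _ _).mpr ⟨hcsub, hlenc⟩, ?_⟩
    rw [← hlenc]
    exact (pv_mem_permutations c.length c rfl s).mpr hcs.symm

-- ===== VERDICT (by name: the statement is the Claim_ definition above) =====
theorem find_sequences_spec : Claim_equal_find_sequences := by
  intro M numbers _ hPre
  show find_sequences M numbers = find_sequences_alt M numbers
  have hM : (0:Int) ≤ M := hPre
  have hA : (find_sequences M numbers).Pairwise (· < ·) := by
    simp only [find_sequences]
    have h := PySem.List.sorted_ofList_pairwise_lt (κ := List Int)
      (List.foldl (fun acc comb => acc ++ PySem.List.permutations comb M.toNat) []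
        (PySem.List.combinations (PySem.List.sorted numbers (fun x => x) false) M.toNat))
    convert h using 2
  have hBsortpool : (PySem.List.sorted numbers (fun x => x) false).Pairwise (· ≤ ·) := by
    simpa using PySem.List.sorted_pairwise numbers (fun x => x)
  have hB : (find_sequences_alt M numbers).Pairwise (· < ·) :=
    pvDfs_sorted _ _ rfl hBsortpool M
  have hmem : ∀ s, s ∈ find_sequences M numbers ↔ s ∈ find_sequences_alt M numbers := by
    intro s
    rw [mem_findA, show find_sequences_alt M numbers
        = pvDfs M (PySem.List.sorted numbers (fun x => x) false) from rfl,
      mem_pvDfs _ _ rfl M s hM]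
    exact (and_congr_left'
      ((PySem.List.sorted_perm numbers (fun x => x) false).subperm_left)).symm
  have hperm : (find_sequences M numbers).Perm (find_sequences_alt M numbers) :=
    (List.perm_ext_iff_of_nodup (hA.imp (fun h => ne_of_lt h)) (hB.imp (fun h => ne_of_lt h))).mpr hmem
  exact List.Perm.eq_of_pairwise (fun a b _ _ h1 h2 => absurd h2 (lt_asymm h1)) hA hB hperm
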